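-- pv_equiv track=rewrite | github.com/Lior8/EvolutionaryTetris | bot/feature_extraction.py | extract_wells
-- ===== SOURCE A (Python) =====
-- def extract_wells(board):
--     """
--     Well is defined as an empty block with non-empty blocks on both its sides (the board's edges are considered
--     non-empty blocks).
--     This function finds the maximum well and the sum of all wells.
--     :param board: The game board
--     :return: Feature vector
--     """
--     board_height = len(board)
--     board_width = len(board[0])
--     max_well = 0
--     cum_well = 0
--     for col in range(1, board_width - 1):
--         curr_well = 0
--         for row in range(board_height):
--             if board[row][col-1] > 0 and board[row][col] == 0 and board[row][col+1] > 0: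
--                 curr_well += 1
--                 cum_well += 1
--                 if curr_well > max_well:
--                     max_well = curr_well
--             else:
--                 curr_well = 0
--     left_well = 0
--     right_well = 0
--     for row in range(board_height):
--         if board[row][0] == 0 and board[row][1] > 0:
--             left_well += 1
--             cum_well += 1
--             if left_well > max_well:
--                 max_well = left_well
--         else:
--             left_well = 0
--
--         if board[row][-1] == 0 and board[row][-2] > 0:
--             right_well += 1
--             cum_well += 1
--             if right_well > max_well:
--                 max_well = right_well
--         else:
--             right_well = 0
--
--     return max_well, cum_well
-- ===== SOURCE B (Python) =====
-- def _well(row, c, width):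
--     if c == 0:
--         return row[0] == 0 and row[1] > 0
--     if c == width - 1:
--         return row[-1] == 0 and row[-2] > 0
--     return row[c - 1] > 0 and row[c] == 0 and row[c + 1] > 0
--
--
-- def extract_wells(board):
--     width = len(board[0])
--     runs = [0] * width
--     max_well = 0
--     cum_well = 0
--     for row in board:
--         runs = [r + 1 if _well(row, c, width) else 0
--                 for c, r in zip(range(width), runs)]
--         cum_well += sum(1 if r > 0 else 0 for r in runs)
--         max_well = max(max_well, max(runs, default=0))
--     return max_well, cum_well
-- ===== Notes on version B (the rewrite author's own statement) =====
-- stated objective: alternative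
-- what changed: A makes one pass per interior column plus a separate interleaved left/right edge loop, each with fused running-max counters; B makes a single row-major sweep that carries a dynamic-programming vector of per-column run lengths (rebuilt from the previous row's vector), adding the row's well count to cum and folding the vector's maximum into max_well.
-- outside the precondition, e.g. on extract_wells([[2], [1, 0]]): A returns (1, 1), B returns (0, 0); on extract_wells([[1, 2, 3], [4, 5]]): A returns (0, 0), B returns (0, 0)
import Mathlib
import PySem

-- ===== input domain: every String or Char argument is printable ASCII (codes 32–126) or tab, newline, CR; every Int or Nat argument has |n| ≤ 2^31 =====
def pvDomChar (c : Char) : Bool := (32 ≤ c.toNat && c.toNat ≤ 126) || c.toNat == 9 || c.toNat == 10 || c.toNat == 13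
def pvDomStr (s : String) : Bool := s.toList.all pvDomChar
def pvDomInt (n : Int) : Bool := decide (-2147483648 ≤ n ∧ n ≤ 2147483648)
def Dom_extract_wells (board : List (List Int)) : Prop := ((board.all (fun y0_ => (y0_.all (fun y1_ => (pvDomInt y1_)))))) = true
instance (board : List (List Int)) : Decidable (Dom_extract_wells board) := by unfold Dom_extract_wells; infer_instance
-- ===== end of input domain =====

-- B replaces A's column-major passes (per-column run counters plus a separate interleaved
-- left/right edge loop) by a single row-major sweep carrying a DP vector of per-column run
-- lengths, rebuilt from the previous row.  Objective: alternative decomposition.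

-- ===== PORT A =====
def extract_wells (board : List (List Int)) : Int × Int :=
  let bh : Int := (board.length : Int)
  let bw : Int := ((PySem.List.pyGetD board 0 ([] : List Int)).length : Int)
  let s1 : Int × Int :=
    (PySem.List.pyRange 1 (bw - 1) 1).foldl (fun (s : Int × Int) col =>
      let t : Int × Int × Int :=
        (PySem.List.pyRange 0 bh 1).foldl (fun (t : Int × Int × Int) row =>
          if PySem.List.pyGetD (PySem.List.pyGetD board row ([] : List Int)) (col - 1) 0 > 0 ∧
             PySem.List.pyGetD (PySem.List.pyGetD board row ([] : List Int)) col 0 = 0 ∧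
             PySem.List.pyGetD (PySem.List.pyGetD board row ([] : List Int)) (col + 1) 0 > 0 then
            (if t.2.2 + 1 > t.1 then t.2.2 + 1 else t.1, t.2.1 + 1, t.2.2 + 1)
          else
            (t.1, t.2.1, 0)) (s.1, s.2, 0)
      (t.1, t.2.1)) (0, 0)
  let s2 : Int × Int × Int × Int :=
    (PySem.List.pyRange 0 bh 1).foldl (fun (s : Int × Int × Int × Int) row =>
      let u : Int × Int × Int :=
        if PySem.List.pyGetD (PySem.List.pyGetD board row ([] : List Int)) 0 0 = 0 ∧
           PySem.List.pyGetD (PySem.List.pyGetD board row ([] : List Int)) 1 0 > 0 then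
          (if s.2.2.1 + 1 > s.1 then s.2.2.1 + 1 else s.1, s.2.1 + 1, s.2.2.1 + 1)
        else (s.1, s.2.1, 0)
      let v : Int × Int × Int :=
        if PySem.List.pyGetD (PySem.List.pyGetD board row ([] : List Int)) (-1) 0 = 0 ∧
           PySem.List.pyGetD (PySem.List.pyGetD board row ([] : List Int)) (-2) 0 > 0 then
          (if s.2.2.2 + 1 > u.1 then s.2.2.2 + 1 else u.1, u.2.1 + 1, s.2.2.2 + 1)
        else (u.1, u.2.1, 0)
      (v.1, v.2.1, u.2.2, v.2.2)) (s1.1, s1.2, 0, 0)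
  (s2.1, s2.2.1)

-- ===== PORT B =====
-- the helper _well of Source B (same literal index expressions as A's three cell rules)
def pvIsWell (row : List Int) (c w : Int) : Bool :=
  if c = 0 then
    decide (PySem.List.pyGetD row 0 0 = 0 ∧ PySem.List.pyGetD row 1 0 > 0)
  else if c = w - 1 then
    decide (PySem.List.pyGetD row (-1) 0 = 0 ∧ PySem.List.pyGetD row (-2) 0 > 0)
  else
    decide (PySem.List.pyGetD row (c - 1) 0 > 0 ∧ PySem.List.pyGetD row c 0 = 0 ∧
            PySem.List.pyGetD row (c + 1) 0 > 0)

def extract_wells_alt (board : List (List Int)) : Int × Int :=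
  let w : Int := ((PySem.List.pyGetD board 0 ([] : List Int)).length : Int)
  let cs : List Int := PySem.List.pyRange 0 w 1      -- range(width)
  let fin : Int × Int × List Int :=
    board.foldl (fun (s : Int × Int × List Int) row =>
        let runs : List Int :=
          (cs.zip s.2.2).map (fun p => if pvIsWell row p.1 w then p.2 + 1 else 0)
        let cum : Int := s.2.1 + (runs.map (fun r => if r > 0 then (1 : Int) else 0)).sum
        let mx : Int := max s.1 ((PySem.List.max? runs (fun y => y)).getD 0)
        (mx, cum, runs))
      (0, 0, List.replicate (PySem.List.pyGetD board 0 ([] : List Int)).length 0)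
  (fin.1, fin.2.1)

-- ===== PRECONDITION & SPEC =====
-- Pre_ excludes boards with fewer than two columns or with a row shorter than the first row:
-- there A raises IndexError on typical contents, and the values it does return hinge on
-- accidental short-circuit and negative-index behaviour of its edge rules.
def Pre_extract_wells (board : List (List Int)) : Prop :=
  2 ≤ (board.headD []).length ∧ ∀ row ∈ board, (board.headD []).length ≤ row.length
instance (board : List (List Int)) : Decidable (Pre_extract_wells board) := by
  unfold Pre_extract_wells; infer_instance

def pvWitness_extract_wells : List (List Int) := [[1, 0, 2], [1, 0, 2]]

def Spec_extract_wells (board : List (List Int)) (out : Int × Int) : Prop :=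
  out = extract_wells_alt board
instance (board : List (List Int)) (out : Int × Int) : Decidable (Spec_extract_wells board out) := by
  unfold Spec_extract_wells; infer_instance

-- ===== CLAIM (what is proved, stated in full; the proofs are below) =====
def Claim_equal_extract_wells : Prop :=
  ∀ (board : List (List Int)), Dom_extract_wells board → Pre_extract_wells board →
    Spec_extract_wells board (extract_wells board)


-- ===== LEMMAS AND PROOFS =====
-- (proof-side helpers; everything below is used only by the proofs)

-- the list of run-counter values produced while scanning a flag column
def pvRV : List Bool → Int → List Int
  | [], _ => []
  | true :: L, r => (r + 1) :: pvRV L (r + 1)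
  | false :: L, _ => 0 :: pvRV L 0

def pvCnt : List Bool → Int
  | [] => 0
  | true :: L => 1 + pvCnt L
  | false :: L => pvCnt L

def pvLast : List Bool → Int → Int
  | [], r => r
  | true :: L, r => pvLast L (r + 1)
  | false :: L, _ => pvLast L 0

def pvCol (board : List (List Int)) (w c : Int) : List Bool :=
  board.map (fun row => pvIsWell row c w)

-- canonical per-column update: running max over the column's run values, plus its flag count
def pvMC (board : List (List Int)) (w : Int) (s : Int × Int) (c : Int) : Int × Int :=
  ((pvRV (pvCol board w c) 0).foldl max s.1, s.2 + pvCnt (pvCol board w c))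

-- named copies of A's two loop bodies and of B's row step (definitionally equal to them)
def pvStepA (t : Int × Int × Int) (f : Bool) : Int × Int × Int :=
  if f then (if t.2.2 + 1 > t.1 then t.2.2 + 1 else t.1, t.2.1 + 1, t.2.2 + 1)
  else (t.1, t.2.1, 0)

def pvStepE (pL pR : List Int → Bool) (s : Int × Int × Int × Int) (r : List Int) :
    Int × Int × Int × Int :=
  let u : Int × Int × Int :=
    if pL r then (if s.2.2.1 + 1 > s.1 then s.2.2.1 + 1 else s.1, s.2.1 + 1, s.2.2.1 + 1)
    else (s.1, s.2.1, 0)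
  let v : Int × Int × Int :=
    if pR r then (if s.2.2.2 + 1 > u.1 then s.2.2.2 + 1 else u.1, u.2.1 + 1, s.2.2.2 + 1)
    else (u.1, u.2.1, 0)
  (v.1, v.2.1, u.2.2, v.2.2)

def pvStepR (w : Int) (cs : List Int) (s : Int × Int × List Int) (row : List Int) :
    Int × Int × List Int :=
  let runs : List Int :=
    (cs.zip s.2.2).map (fun p => if pvIsWell row p.1 w then p.2 + 1 else 0)
  let cum : Int := s.2.1 + (runs.map (fun r => if r > 0 then (1 : Int) else 0)).sum
  let mx : Int := max s.1 ((PySem.List.max? runs (fun y => y)).getD 0)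
  (mx, cum, runs)

def pvColStepA (board : List (List Int)) (w : Int) (s : Int × Int) (c : Int) : Int × Int :=
  let t : Int × Int × Int := (pvCol board w c).foldl pvStepA (s.1, s.2, 0)
  (t.1, t.2.1)

theorem pv_maxseed (l : List Int) : ∀ a : Int, 0 ≤ a → l.foldl max a = max a (l.foldl max 0) := by
  induction l with
  | nil => intro a ha; simp; omega
  | cons x t ih =>
    intro a ha
    simp only [List.foldl_cons]
    rw [ih (max a x) (le_trans ha (le_max_left _ _)), ih (max 0 x) (le_max_left _ _)]
    omega

theorem pv_ifmax (a b : Int) : (if b > a then b else a) = max a b := by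
  split_ifs <;> omega

theorem pv_maxseed2 (RL RR : List Int) (a : Int) (ha : 0 ≤ a) :
    RR.foldl max (RL.foldl max a)
      = max a (max (RL.foldl max 0) (RR.foldl max 0)) := by
  rw [pv_maxseed RR _ (le_trans ha (PySem.List.le_foldl_max RL a).1), pv_maxseed RL a ha]
  omega

theorem pv_maxseed2' (RL RR : List Int) (b g : Int) (hb : 0 ≤ b) :
    RR.foldl max (max (RL.foldl max b) g)
      = max (max b g) (max (RL.foldl max 0) (RR.foldl max 0)) := by
  have h1 : (0:Int) ≤ RL.foldl max b := le_trans hb (PySem.List.le_foldl_max RL b).1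
  rw [pv_maxseed RR _ (le_trans h1 (le_max_left _ g)), pv_maxseed RL b hb]
  omega

theorem pvRV_cons (f : Bool) (L : List Bool) (r : Int) :
    pvRV (f :: L) r = (if f then r + 1 else 0) :: pvRV L (if f then r + 1 else 0) := by
  cases f <;> rfl

theorem pvCnt_cons (f : Bool) (L : List Bool) :
    pvCnt (f :: L) = (if f then (1 : Int) else 0) + pvCnt L := by
  cases f <;> simp [pvCnt]

theorem pvLast_cons (f : Bool) (L : List Bool) (r : Int) :
    pvLast (f :: L) r = pvLast L (if f then r + 1 else 0) := by
  cases f <;> rfl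

theorem pv_runA (L : List Bool) : ∀ (mx cum r : Int), 0 ≤ mx →
    L.foldl pvStepA (mx, cum, r) = ((pvRV L r).foldl max mx, cum + pvCnt L, pvLast L r) := by
  induction L with
  | nil => intro mx cum r _; simp [pvRV, pvCnt, pvLast]
  | cons f L ih =>
    intro mx cum r hmx
    cases f with
    | true =>
      show L.foldl pvStepA (if r + 1 > mx then r + 1 else mx, cum + 1, r + 1) = _
      rw [ih _ _ _ (by omega : (0:Int) ≤ if r + 1 > mx then r + 1 else mx)]
      simp only [pvRV, pvCnt, pvLast, List.foldl_cons, pv_ifmax, Prod.mk.injEq]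
      and_intros <;> first | trivial | omega
    | false =>
      show L.foldl pvStepA (mx, cum, 0) = _
      rw [ih _ _ _ hmx]
      simp only [pvRV, pvCnt, pvLast, List.foldl_cons, Prod.mk.injEq]
      have hm : max mx 0 = mx := by omega
      rw [hm]
      and_intros <;> trivial

theorem pv_fold_nonneg (board : List (List Int)) (w : Int) :
    ∀ (l : List Int) (s : Int × Int), 0 ≤ s.1 → 0 ≤ (l.foldl (pvMC board w) s).1 := by
  intro l
  induction l with
  | nil => intro s hs; exact hs
  | cons c l ih =>
    intro s hs
    exact ih _ (le_trans hs (PySem.List.le_foldl_max _ _).1)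

-- index loop over rows → structural fold over the rows themselves
theorem pv_rowfold {β : Type} (xs : List (List Int)) (f : β → List Int → β) (init : β) :
    (PySem.List.pyRange 0 (xs.length : Int) 1).foldl
        (fun acc j => f acc (PySem.List.pyGetD xs j ([] : List Int))) init
    = xs.foldl f init :=
  PySem.List.foldl_pyRange_zero_pyGetD' xs ([] : List Int) f init

theorem pv_head (board : List (List Int)) :
    PySem.List.pyGetD board 0 ([] : List Int) = board.headD [] := by
  cases board <;> simp [PySem.List.pyGetD_zero]

-- the three cell rules of A, as instances of the uniform grid rule pvIsWell
theorem pv_isWell_interior (r : List Int) (c w : Int) (h1 : 1 ≤ c) (h2 : c < w - 1) :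
    pvIsWell r c w = decide (PySem.List.pyGetD r (c - 1) 0 > 0 ∧ PySem.List.pyGetD r c 0 = 0 ∧
      PySem.List.pyGetD r (c + 1) 0 > 0) := by
  have hc0 : ¬ c = 0 := by omega
  have hc1 : ¬ c = w - 1 := by omega
  simp [pvIsWell, hc0, hc1]

theorem pv_isWell_left (r : List Int) (w : Int) :
    pvIsWell r 0 w = decide (PySem.List.pyGetD r 0 0 = 0 ∧ PySem.List.pyGetD r 1 0 > 0) := by
  simp [pvIsWell]

theorem pv_isWell_right (r : List Int) (w : Int) (hw : 2 ≤ w) :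
    pvIsWell r (w - 1) w
      = decide (PySem.List.pyGetD r (-1) 0 = 0 ∧ PySem.List.pyGetD r (-2) 0 > 0) := by
  have hc0 : ¬ w - 1 = 0 := by omega
  simp [pvIsWell, hc0]

-- A's edge loop (interleaved left/right counters) characterised
theorem pv_edge (rows : List (List Int)) (pL pR : List Int → Bool) :
    ∀ (mx cum lw rw : Int), 0 ≤ mx →
    rows.foldl (pvStepE pL pR) (mx, cum, lw, rw)
    = ((pvRV (rows.map pR) rw).foldl max ((pvRV (rows.map pL) lw).foldl max mx),
       cum + pvCnt (rows.map pL) + pvCnt (rows.map pR),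
       pvLast (rows.map pL) lw, pvLast (rows.map pR) rw) := by
  induction rows with
  | nil => intro mx cum lw rw _; simp [pvRV, pvCnt, pvLast]
  | cons r rows ih =>
    intro mx cum lw rw hmx
    simp only [List.foldl_cons, List.map_cons]
    cases hL : pL r <;> cases hR : pR r <;>
        simp only [pvStepE, hL, hR, Bool.false_eq_true, if_true, if_false,
          pv_ifmax, pvRV, pvCnt, pvLast, List.foldl_cons] <;>
        rw [ih _ _ _ _ (by omega)] <;>
        refine congrArg₂ Prod.mk ?_ (congrArg₂ Prod.mk (by omega)
          (congrArg₂ Prod.mk (by omega) (by omega)))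
    · rw [pv_maxseed2 (pvRV (rows.map pL) 0) (pvRV (rows.map pR) 0) mx hmx,
          pv_maxseed2' (pvRV (rows.map pL) 0) (pvRV (rows.map pR) 0) (max mx 0) 0 (by omega)]
      omega
    · rw [pv_maxseed2 (pvRV (rows.map pL) 0) (pvRV (rows.map pR) (rw + 1)) (max mx (rw + 1)) (by omega),
          pv_maxseed2' (pvRV (rows.map pL) 0) (pvRV (rows.map pR) (rw + 1)) (max mx 0) (rw + 1) (by omega)]
      omega
    · rw [pv_maxseed2 (pvRV (rows.map pL) (lw + 1)) (pvRV (rows.map pR) 0) (max mx (lw + 1)) (by omega),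
          pv_maxseed2' (pvRV (rows.map pL) (lw + 1)) (pvRV (rows.map pR) 0) (max mx (lw + 1)) 0 (by omega)]
      omega
    · rw [pv_maxseed2 (pvRV (rows.map pL) (lw + 1)) (pvRV (rows.map pR) (rw + 1))
            (max (max mx (lw + 1)) (rw + 1)) (by omega),
          pv_maxseed2' (pvRV (rows.map pL) (lw + 1)) (pvRV (rows.map pR) (rw + 1))
            (max mx (lw + 1)) (rw + 1) (by omega)]

-- A's interior column step equals the canonical per-column update, along the fold
theorem pv_AtoMC (board : List (List Int)) (w : Int) :
    ∀ (l : List Int) (s : Int × Int), 0 ≤ s.1 →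
      l.foldl (pvColStepA board w) s = l.foldl (pvMC board w) s := by
  intro l
  induction l with
  | nil => intro s _; rfl
  | cons c l ih =>
    intro s hs
    simp only [List.foldl_cons]
    have h1 : pvColStepA board w s c = pvMC board w s c := by
      unfold pvColStepA
      rw [pv_runA _ _ _ _ hs]
      rfl
    rw [h1, ih _ (le_trans hs (PySem.List.le_foldl_max _ _).1)]

-- A's port, reduced to a fold of the canonical column update (interior columns, then 0, then w-1)
theorem pv_A_eq (board : List (List Int)) (w : Int)
    (hwdef : w = ((PySem.List.pyGetD board 0 ([] : List Int)).length : Int)) (hw2 : 2 ≤ w) :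
    extract_wells board
      = pvMC board w (pvMC board w
          ((PySem.List.pyRange 1 (w - 1) 1).foldl (pvMC board w) (0, 0)) 0) (w - 1) := by
  simp only [extract_wells]
  rw [← hwdef]
  have hint : (PySem.List.pyRange 1 (w - 1) 1).foldl (fun (s : Int × Int) col =>
      let t : Int × Int × Int :=
        (PySem.List.pyRange 0 (board.length : Int) 1).foldl (fun (t : Int × Int × Int) row =>
          if PySem.List.pyGetD (PySem.List.pyGetD board row ([] : List Int)) (col - 1) 0 > 0 ∧
             PySem.List.pyGetD (PySem.List.pyGetD board row ([] : List Int)) col 0 = 0 ∧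
             PySem.List.pyGetD (PySem.List.pyGetD board row ([] : List Int)) (col + 1) 0 > 0 then
            (if t.2.2 + 1 > t.1 then t.2.2 + 1 else t.1, t.2.1 + 1, t.2.2 + 1)
          else
            (t.1, t.2.1, 0)) (s.1, s.2, 0)
      (t.1, t.2.1)) ((0 : Int), (0 : Int))
      = (PySem.List.pyRange 1 (w - 1) 1).foldl (pvMC board w) (0, 0) := by
    refine (PySem.List.foldl_congr_mem _ _ _ _ ?_).trans (pv_AtoMC board w _ _ (by norm_num))
    intro s c hc
    rw [PySem.List.mem_pyRange_one] at hc
    have h1 := pv_rowfold board (fun (t : Int × Int × Int) (r : List Int) =>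
      if PySem.List.pyGetD r (c - 1) 0 > 0 ∧ PySem.List.pyGetD r c 0 = 0 ∧
         PySem.List.pyGetD r (c + 1) 0 > 0 then
        (if t.2.2 + 1 > t.1 then t.2.2 + 1 else t.1, t.2.1 + 1, t.2.2 + 1)
      else (t.1, t.2.1, 0)) ((s.1, s.2, 0) : Int × Int × Int)
    show (((PySem.List.pyRange 0 (board.length : Int) 1).foldl (fun (t : Int × Int × Int) row =>
        if PySem.List.pyGetD (PySem.List.pyGetD board row ([] : List Int)) (c - 1) 0 > 0 ∧
           PySem.List.pyGetD (PySem.List.pyGetD board row ([] : List Int)) c 0 = 0 ∧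
           PySem.List.pyGetD (PySem.List.pyGetD board row ([] : List Int)) (c + 1) 0 > 0 then
          (if t.2.2 + 1 > t.1 then t.2.2 + 1 else t.1, t.2.1 + 1, t.2.2 + 1)
        else (t.1, t.2.1, 0)) (s.1, s.2, 0)).1,
      ((PySem.List.pyRange 0 (board.length : Int) 1).foldl (fun (t : Int × Int × Int) row =>
        if PySem.List.pyGetD (PySem.List.pyGetD board row ([] : List Int)) (c - 1) 0 > 0 ∧
           PySem.List.pyGetD (PySem.List.pyGetD board row ([] : List Int)) c 0 = 0 ∧
           PySem.List.pyGetD (PySem.List.pyGetD board row ([] : List Int)) (c + 1) 0 > 0 then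
          (if t.2.2 + 1 > t.1 then t.2.2 + 1 else t.1, t.2.1 + 1, t.2.2 + 1)
        else (t.1, t.2.1, 0)) (s.1, s.2, 0)).2.1)
      = pvColStepA board w s c
    rw [h1]
    have h2 : (fun (t : Int × Int × Int) (r : List Int) =>
        if PySem.List.pyGetD r (c - 1) 0 > 0 ∧ PySem.List.pyGetD r c 0 = 0 ∧
           PySem.List.pyGetD r (c + 1) 0 > 0 then
          (if t.2.2 + 1 > t.1 then t.2.2 + 1 else t.1, t.2.1 + 1, t.2.2 + 1)
        else (t.1, t.2.1, 0))
        = (fun (t : Int × Int × Int) (r : List Int) => pvStepA t (pvIsWell r c w)) := by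
      funext t r
      simp only [pvStepA, pv_isWell_interior r c w (by omega) (by omega), decide_eq_true_eq]
    rw [h2, show board.foldl (fun (t : Int × Int × Int) (r : List Int) => pvStepA t (pvIsWell r c w))
        ((s.1, s.2, 0) : Int × Int × Int) = (pvCol board w c).foldl pvStepA (s.1, s.2, 0) from
        List.foldl_map.symm]
    rfl
  rw [hint]
  have hedge := fun (init : Int × Int × Int × Int) => pv_rowfold board
    (fun (s : Int × Int × Int × Int) (r : List Int) =>
      let u : Int × Int × Int :=
        if PySem.List.pyGetD r 0 0 = 0 ∧ PySem.List.pyGetD r 1 0 > 0 then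
          (if s.2.2.1 + 1 > s.1 then s.2.2.1 + 1 else s.1, s.2.1 + 1, s.2.2.1 + 1)
        else (s.1, s.2.1, 0)
      let v : Int × Int × Int :=
        if PySem.List.pyGetD r (-1) 0 = 0 ∧ PySem.List.pyGetD r (-2) 0 > 0 then
          (if s.2.2.2 + 1 > u.1 then s.2.2.2 + 1 else u.1, u.2.1 + 1, s.2.2.2 + 1)
        else (u.1, u.2.1, 0)
      (v.1, v.2.1, u.2.2, v.2.2)) init
  rw [hedge]
  have hstep : (fun (s : Int × Int × Int × Int) (r : List Int) =>
      let u : Int × Int × Int :=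
        if PySem.List.pyGetD r 0 0 = 0 ∧ PySem.List.pyGetD r 1 0 > 0 then
          (if s.2.2.1 + 1 > s.1 then s.2.2.1 + 1 else s.1, s.2.1 + 1, s.2.2.1 + 1)
        else (s.1, s.2.1, 0)
      let v : Int × Int × Int :=
        if PySem.List.pyGetD r (-1) 0 = 0 ∧ PySem.List.pyGetD r (-2) 0 > 0 then
          (if s.2.2.2 + 1 > u.1 then s.2.2.2 + 1 else u.1, u.2.1 + 1, s.2.2.2 + 1)
        else (u.1, u.2.1, 0)
      (v.1, v.2.1, u.2.2, v.2.2))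
      = pvStepE (fun r => pvIsWell r 0 w) (fun r => pvIsWell r (w - 1) w) := by
    funext s r
    simp only [pvStepE, pv_isWell_left, pv_isWell_right r w hw2, decide_eq_true_eq]
  rw [hstep]
  have hS := pv_fold_nonneg board w (PySem.List.pyRange 1 (w - 1) 1) (0, 0) (by norm_num)
  rw [pv_edge board _ _ _ _ _ _ hS]
  rfl

theorem pv_comm (board : List (List Int)) (w : Int) (s : Int × Int) (a c : Int)
    (hs : 0 ≤ s.1) : pvMC board w (pvMC board w s a) c = pvMC board w (pvMC board w s c) a := by
  unfold pvMC
  have ha := (PySem.List.le_foldl_max (pvRV (pvCol board w a) 0) s.1).1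
  have hc := (PySem.List.le_foldl_max (pvRV (pvCol board w c) 0) s.1).1
  refine Prod.ext ?_ (by simp; omega)
  simp only
  rw [pv_maxseed _ _ (le_trans hs ha), pv_maxseed _ _ (le_trans hs hc),
      pv_maxseed _ s.1 hs, pv_maxseed _ s.1 hs]
  omega

theorem pv_swap (board : List (List Int)) (w : Int) :
    ∀ (l : List Int) (s : Int × Int) (a : Int), 0 ≤ s.1 →
      l.foldl (pvMC board w) (pvMC board w s a) = pvMC board w (l.foldl (pvMC board w) s) a := by
  intro l
  induction l with
  | nil => intro s a _; rfl
  | cons c l ih =>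
    intro s a hs
    simp only [List.foldl_cons]
    rw [pv_comm board w s a c hs, ih _ _ (le_trans hs (PySem.List.le_foldl_max _ _).1)]

-- the ends of the column range, folded in
theorem pv_assemble (board : List (List Int)) (w : Int) (hw2 : 2 ≤ w) :
    pvMC board w (pvMC board w
        ((PySem.List.pyRange 1 (w - 1) 1).foldl (pvMC board w) (0, 0)) 0) (w - 1)
      = (PySem.List.pyRange 0 w 1).foldl (pvMC board w) (0, 0) := by
  have hr0 : PySem.List.pyRange 0 w 1
      = 0 :: (PySem.List.pyRange 1 (w - 1) 1 ++ PySem.List.pyRange (w - 1) w 1) := by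
    rw [PySem.List.pyRange_one_cons (by omega : (0:Int) < w)]
    norm_num
    rw [PySem.List.pyRange_one_append 1 (w - 1) w (by omega) (by omega)]
  have hr1 : PySem.List.pyRange (w - 1) w 1 = [w - 1] := by
    rw [PySem.List.pyRange_one_cons (by omega : w - 1 < w),
        PySem.List.pyRange_one_eq_nil (by omega : w ≤ w - 1 + 1)]
  rw [hr0, hr1, List.foldl_cons, List.foldl_append,
      pv_swap board w (PySem.List.pyRange 1 (w - 1) 1) (0, 0) 0 (by norm_num)]
  rfl

-- ===== B-side lemmas: the row-major DP sweep equals the same canonical column fold =====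

theorem pv_maxgetD (L : List Int) (h : ∀ r ∈ L, 0 ≤ r) :
    ((PySem.List.max? L (fun y => y)).getD 0) = L.foldl max 0 := by
  cases L with
  | nil => rfl
  | cons x t =>
    rw [PySem.List.max?_id_cons, Option.getD_some, List.foldl_cons,
        show max 0 x = x by have := h x (by simp); omega]

theorem pv_flatMax1 (g : Int → List Int) (h : Int → Int) :
    ∀ (cs : List Int) (mx : Int),
      cs.foldl (fun m c => (g c).foldl max (max m (h c))) mx
        = (cs.flatMap (fun c => h c :: g c)).foldl max mx := by
  intro cs
  induction cs with
  | nil => intro mx; rfl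
  | cons c cs ih =>
    intro mx
    simp only [List.foldl_cons, List.flatMap_cons, List.foldl_append, ih]

theorem pv_flatMax2 (g : Int → List Int) :
    ∀ (cs : List Int) (mx : Int),
      cs.foldl (fun m c => (g c).foldl max m) mx = (cs.flatMap g).foldl max mx := by
  intro cs
  induction cs with
  | nil => intro mx; rfl
  | cons c cs ih =>
    intro mx
    simp only [List.foldl_cons, List.flatMap_cons, List.foldl_append, ih]

theorem pv_permflat (g : Int → List Int) (h : Int → Int) :
    ∀ cs : List Int,
      (cs.flatMap (fun c => h c :: g c)).Perm (cs.map h ++ cs.flatMap g) := by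
  intro cs
  induction cs with
  | nil => simp
  | cons c cs ih =>
    simp only [List.flatMap_cons, List.map_cons, List.cons_append]
    refine List.Perm.cons (h c) ?_
    have h1 : (g c ++ cs.flatMap (fun c => h c :: g c)).Perm
        (g c ++ (cs.map h ++ cs.flatMap g)) := List.Perm.append_left _ ih
    have h2 : (g c ++ (cs.map h ++ cs.flatMap g)).Perm
        (cs.map h ++ (g c ++ cs.flatMap g)) := by
      rw [← List.append_assoc, ← List.append_assoc]
      exact List.Perm.append_right _ List.perm_append_comm
    exact h1.trans h2

-- loop interchange for running maxima: pulling the per-row maxima out of the per-column folds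
theorem pv_interchange (g : Int → List Int) (h : Int → Int) (cs : List Int) (mx : Int) :
    cs.foldl (fun m c => (g c).foldl max (max m (h c))) mx
      = cs.foldl (fun m c => (g c).foldl max m) (cs.foldl (fun m c => max m (h c)) mx) := by
  have hmap : cs.foldl (fun m c => max m (h c)) mx = (cs.map h).foldl max mx := by
    rw [List.foldl_map]
  rw [pv_flatMax1, pv_flatMax2, hmap, ← List.foldl_append]
  exact (pv_permflat g h cs).foldl_eq mx

-- the main invariant of B's row-major sweep, for an arbitrary column list cs and
-- an arbitrary (nonnegative) vector ρ of current run lengths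
theorem pv_rowmajor (w : Int) (cs : List Int) (rs : List (List Int)) :
    ∀ (mx cum : Int) (ρ : Int → Int), 0 ≤ mx → (∀ c, 0 ≤ ρ c) →
    rs.foldl (pvStepR w cs) (mx, cum, cs.map ρ)
      = (cs.foldl (fun m c => (pvRV (pvCol rs w c) (ρ c)).foldl max m) mx,
         cum + (cs.map (fun c => pvCnt (pvCol rs w c))).sum,
         cs.map (fun c => pvLast (pvCol rs w c) (ρ c))) := by
  induction rs with
  | nil =>
    intro mx cum ρ _ _
    simp [pvCol, pvRV, pvCnt, pvLast]
  | cons row rs ih =>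
    intro mx cum ρ hmx hρ
    have hcolcons : ∀ c : Int, pvCol (row :: rs) w c = pvIsWell row c w :: pvCol rs w c := by
      intro c; rfl
    set ρ' : Int → Int := fun c => if pvIsWell row c w then ρ c + 1 else 0 with hρ'def
    have hρ'0 : ∀ c, 0 ≤ ρ' c := by
      intro c
      simp only [hρ'def]
      split
      · have := hρ c; omega
      · omega
    have hruns : (cs.zip (cs.map ρ)).map
        (fun p => if pvIsWell row p.1 w then p.2 + 1 else 0) = cs.map ρ' := by
      rw [show cs.zip (cs.map ρ) = (cs.map id).zip (cs.map ρ) by rw [List.map_id],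
          List.zip_map', List.map_map]
      rfl
    have hruns0 : ∀ r ∈ cs.map ρ', 0 ≤ r := by
      intro r hr
      obtain ⟨c, -, rfl⟩ := List.mem_map.mp hr
      exact hρ'0 c
    have hmx1 : mx ≤ cs.foldl (fun m c => max m (ρ' c)) mx :=
      (PySem.List.le_foldl_max_int cs ρ' mx).1
    have hstep : pvStepR w cs (mx, cum, cs.map ρ) row
        = (cs.foldl (fun m c => max m (ρ' c)) mx,
           cum + (cs.map (fun c => if pvIsWell row c w then (1 : Int) else 0)).sum,
           cs.map ρ') := by
      simp only [pvStepR, hruns]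
      refine congrArg₂ Prod.mk ?_ (congrArg₂ Prod.mk ?_ rfl)
      · rw [pv_maxgetD _ hruns0, ← pv_maxseed _ _ hmx, List.foldl_map]
      · congr 1
        rw [List.map_map]
        refine congrArg List.sum (List.map_congr_left ?_)
        intro c _
        have := hρ c
        simp only [Function.comp, hρ'def]
        by_cases hf : pvIsWell row c w
        · simp only [hf, if_true]
          rw [if_pos (by omega)]
        · simp [hf]
    rw [List.foldl_cons, hstep, ih _ _ ρ' (le_trans hmx hmx1) hρ'0]
    refine congrArg₂ Prod.mk ?_ (congrArg₂ Prod.mk ?_ ?_)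
    · rw [show (fun m c => (pvRV (pvCol (row :: rs) w c) (ρ c)).foldl max m)
          = (fun m c => (pvRV (pvCol rs w c) (ρ' c)).foldl max (max m (ρ' c))) by
            funext m c
            rw [hcolcons c, pvRV_cons, List.foldl_cons],
        pv_interchange]
    · rw [show (fun c => pvCnt (pvCol (row :: rs) w c))
          = (fun c => (if pvIsWell row c w then (1 : Int) else 0) + pvCnt (pvCol rs w c)) by
            funext c
            rw [hcolcons c, pvCnt_cons],
        PySem.List.sum_map_add_int]
      omega
    · refine List.map_congr_left ?_
      intro c _
      rw [hcolcons c, pvLast_cons]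

-- the canonical column fold, componentwise
theorem pvMC_split (board : List (List Int)) (w : Int) :
    ∀ (cs : List Int) (a b : Int),
      cs.foldl (pvMC board w) (a, b)
        = (cs.foldl (fun m c => (pvRV (pvCol board w c) 0).foldl max m) a,
           b + (cs.map (fun c => pvCnt (pvCol board w c))).sum) := by
  intro cs
  induction cs with
  | nil => intro a b; simp
  | cons c cs ih =>
    intro a b
    simp only [List.foldl_cons, List.map_cons, List.sum_cons]
    rw [show pvMC board w (a, b) c
        = ((pvRV (pvCol board w c) 0).foldl max a, b + pvCnt (pvCol board w c)) from rfl, ih]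
    refine congrArg₂ Prod.mk rfl ?_
    omega

-- B's port, reduced to the canonical column fold
theorem pv_B_eq (board : List (List Int)) (w : Int)
    (hwdef : w = ((PySem.List.pyGetD board 0 ([] : List Int)).length : Int)) :
    extract_wells_alt board = (PySem.List.pyRange 0 w 1).foldl (pvMC board w) (0, 0) := by
  have hlen : List.replicate (PySem.List.pyGetD board 0 ([] : List Int)).length (0 : Int)
      = (PySem.List.pyRange 0 w 1).map (fun _ => (0 : Int)) := by
    rw [List.map_const', PySem.List.length_pyRange_one, hwdef]
    simp
  simp only [extract_wells_alt]
  rw [← hwdef, hlen]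
  have hfold : board.foldl (fun (s : Int × Int × List Int) row =>
      let runs : List Int :=
        ((PySem.List.pyRange 0 w 1).zip s.2.2).map
          (fun p => if pvIsWell row p.1 w then p.2 + 1 else 0)
      let cum : Int := s.2.1 + (runs.map (fun r => if r > 0 then (1 : Int) else 0)).sum
      let mx : Int := max s.1 ((PySem.List.max? runs (fun y => y)).getD 0)
      (mx, cum, runs))
        ((0 : Int), (0 : Int), (PySem.List.pyRange 0 w 1).map (fun _ => (0 : Int)))
      = board.foldl (pvStepR w (PySem.List.pyRange 0 w 1))
        ((0 : Int), (0 : Int), (PySem.List.pyRange 0 w 1).map (fun _ => (0 : Int))) := rfl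
  rw [hfold,
      pv_rowmajor w (PySem.List.pyRange 0 w 1) board 0 0 (fun _ => 0) (le_refl 0)
        (fun _ => le_refl 0),
      pvMC_split board w (PySem.List.pyRange 0 w 1) 0 0]

-- ===== VERDICT (by name: the statement is the Claim_ definition above) =====
theorem extract_wells_spec : Claim_equal_extract_wells := by
  intro board _hdom hpre
  unfold Spec_extract_wells
  obtain ⟨hw2n, _hrows⟩ := hpre
  have hw2 : (2:Int) ≤ ((PySem.List.pyGetD board 0 ([] : List Int)).length : Int) := by
    rw [pv_head]; exact_mod_cast hw2n
  rw [pv_A_eq board _ rfl hw2, pv_assemble board _ hw2, pv_B_eq board _ rfl]
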